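-- pv_equiv track=rewrite | github.com/CrisBarreraml/Estructura_de_Datos | Librerias.py | dividir_en_archivos
-- ===== SOURCE A (Python) =====
-- def dividir_en_archivos(lista):
--     archivo1, archivo2 = [], []
--     toggle = True
--     for i in range(0, len(lista), 2):
--         sublista = sorted(lista[i:i+2])
--         if toggle:
--             archivo1.append(sublista)
--         else:
--             archivo2.append(sublista)
--         toggle = not toggle
--     return archivo1, archivo2
-- ===== SOURCE B (Python) =====
-- def dividir_en_archivos(lista):
--     n = len(lista)
--     archivo1 = [sorted(lista[i:i+2]) for i in range(0, n, 4)]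
--     archivo2 = [sorted(lista[i:i+2]) for i in range(2, n, 4)]
--     return archivo1, archivo2
-- ===== Notes on version B (the rewrite author's own statement) =====
-- stated objective: simpler
-- what changed: Replaces the single loop with a toggle flag and conditional appends by two independent stride-4 comprehensions, one per output bucket, separating the two result lists instead of interleaving their construction.
import Mathlib
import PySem

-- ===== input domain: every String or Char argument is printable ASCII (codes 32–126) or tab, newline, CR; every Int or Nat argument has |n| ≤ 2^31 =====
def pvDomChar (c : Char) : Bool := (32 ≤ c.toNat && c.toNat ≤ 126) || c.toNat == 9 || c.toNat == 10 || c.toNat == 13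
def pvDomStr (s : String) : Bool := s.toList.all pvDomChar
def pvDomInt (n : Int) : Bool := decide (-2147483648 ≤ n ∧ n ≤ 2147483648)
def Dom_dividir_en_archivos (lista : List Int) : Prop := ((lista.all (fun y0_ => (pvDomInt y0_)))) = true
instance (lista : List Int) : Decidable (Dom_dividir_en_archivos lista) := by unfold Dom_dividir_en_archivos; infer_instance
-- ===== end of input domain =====

-- B replaces A's toggled single loop by two independent stride-4 comprehensions, one per bucket (objective: simpler).

-- ===== PORT A =====
-- literal port: fold over range(0, len(lista), 2) with state (archivo1, archivo2, toggle)
def dividir_en_archivos (lista : List Int) : List (List Int) × List (List Int) :=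
  let st := (PySem.List.pyRange 0 (lista.length : Int) 2).foldl
    (fun (st : List (List Int) × List (List Int) × Bool) i =>
      let sublista := PySem.List.sorted (PySem.List.slice lista (some i) (some (i + 2))) (fun x => x) false
      if st.2.2 then (st.1 ++ [sublista], st.2.1, false)
      else (st.1, st.2.1 ++ [sublista], true))
    ([], [], true)
  (st.1, st.2.1)

-- ===== PORT B =====
def dividir_en_archivos_alt (lista : List Int) : List (List Int) × List (List Int) :=
  let n : Int := (lista.length : Int)
  ((PySem.List.pyRange 0 n 4).map
      (fun i => PySem.List.sorted (PySem.List.slice lista (some i) (some (i + 2))) (fun x => x) false),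
   (PySem.List.pyRange 2 n 4).map
      (fun i => PySem.List.sorted (PySem.List.slice lista (some i) (some (i + 2))) (fun x => x) false))

-- ===== PRECONDITION & SPEC =====
def Spec_dividir_en_archivos (lista : List Int) (out : List (List Int) × List (List Int)) : Prop := out = dividir_en_archivos_alt lista
instance (lista : List Int) (out : List (List Int) × List (List Int)) : Decidable (Spec_dividir_en_archivos lista out) := by unfold Spec_dividir_en_archivos; infer_instance

-- ===== CLAIM (what is proved, stated in full; the proofs are below) =====
def Claim_equal_dividir_en_archivos : Prop := ∀ (lista : List Int), Dom_dividir_en_archivos lista → Spec_dividir_en_archivos lista (dividir_en_archivos lista)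

-- ===== LEMMAS AND PROOFS =====

theorem pyRange_nil_of_le (a b s : Int) (hs : 0 < s) (h : b ≤ a) :
    PySem.List.pyRange a b s = [] := by
  rw [PySem.List.pyRange_of_pos a b hs]
  simp [show ¬ a < b by omega]

theorem pyRange_cons_step (a b s : Int) (hs : 0 < s) (h : a < b) :
    PySem.List.pyRange a b s = a :: PySem.List.pyRange (a + s) b s := by
  rw [PySem.List.pyRange_of_pos a b hs, PySem.List.pyRange_of_pos (a + s) b hs]
  have hc : b - a + s - 1 = (b - a - 1) + 1 * s := by ring
  have hdiv : (b - a + s - 1) / s = (b - a - 1) / s + 1 := by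
    rw [hc, Int.add_mul_ediv_right _ _ (by omega : s ≠ 0)]
  have h0 : 0 ≤ (b - a - 1) / s := Int.ediv_nonneg (by omega) (by omega)
  by_cases h2 : a + s < b
  · have hc2 : b - (a + s) + s - 1 = b - a - 1 := by ring
    rw [if_pos h, if_pos h2, hc2, hdiv,
      Int.toNat_add (by omega) (by omega)]
    rw [show Int.toNat 1 = 1 from rfl, List.range_succ_eq_map]
    simp only [List.map_cons, List.map_map]
    congr 1
    · push_cast; ring
    · apply List.map_congr_left
      intro k _
      simp only [Function.comp]
      push_cast
      ring
  · have hlt : b - a - 1 < s := by omega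
    have : (b - a - 1) / s = 0 := Int.ediv_eq_zero_of_lt (by omega) hlt
    rw [if_pos h, if_neg h2, hdiv, this]
    simp

-- the loop invariant: A's fold with toggle=true splits range(a,n,2) into strides of 4
theorem loop_split (f : Int → List Int) :
    ∀ (m : Nat) (a n : Int), (n - a).toNat ≤ m → ∀ (acc1 acc2 : List (List Int)),
    ((PySem.List.pyRange a n 2).foldl
      (fun (st : List (List Int) × List (List Int) × Bool) i =>
        if st.2.2 then (st.1 ++ [f i], st.2.1, false)
        else (st.1, st.2.1 ++ [f i], true))
      (acc1, acc2, true)).1 = acc1 ++ (PySem.List.pyRange a n 4).map f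
    ∧ ((PySem.List.pyRange a n 2).foldl
      (fun (st : List (List Int) × List (List Int) × Bool) i =>
        if st.2.2 then (st.1 ++ [f i], st.2.1, false)
        else (st.1, st.2.1 ++ [f i], true))
      (acc1, acc2, true)).2.1 = acc2 ++ (PySem.List.pyRange (a + 2) n 4).map f := by
  intro m
  induction m with
  | zero =>
    intro a n hm acc1 acc2
    have hna : n ≤ a := by omega
    rw [pyRange_nil_of_le a n 2 (by omega) hna, pyRange_nil_of_le a n 4 (by omega) hna,
      pyRange_nil_of_le (a + 2) n 4 (by omega) (by omega)]
    simp
  | succ m ih =>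
    intro a n hm acc1 acc2
    by_cases h : a < n
    · rw [pyRange_cons_step a n 2 (by omega) h]
      by_cases h2 : a + 2 < n
      · rw [pyRange_cons_step (a + 2) n 2 (by omega) h2,
          pyRange_cons_step a n 4 (by omega) h,
          pyRange_cons_step (a + 2) n 4 (by omega) h2]
        simp only [List.foldl_cons, if_pos, if_neg, Bool.false_eq_true,
          not_false_eq_true]
        rw [show a + 2 + 2 = a + 4 by ring]
        obtain ⟨ih1, ih2⟩ := ih (a + 4) n (by omega) (acc1 ++ [f a]) (acc2 ++ [f (a + 2)])
        constructor
        · rw [ih1]; simp [List.append_assoc]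
        · rw [show a + 2 + 4 = a + 4 + 2 by ring, ih2]; simp [List.append_assoc]
      · rw [pyRange_nil_of_le (a + 2) n 2 (by omega) (by omega),
          pyRange_cons_step a n 4 (by omega) h,
          pyRange_nil_of_le (a + 4) n 4 (by omega) (by omega),
          pyRange_nil_of_le (a + 2) n 4 (by omega) (by omega)]
        simp
    · rw [pyRange_nil_of_le a n 2 (by omega) (by omega),
        pyRange_nil_of_le a n 4 (by omega) (by omega),
        pyRange_nil_of_le (a + 2) n 4 (by omega) (by omega)]
      simp

-- ===== VERDICT (by name: the statement is the Claim_ definition above) =====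
theorem dividir_en_archivos_spec : Claim_equal_dividir_en_archivos := by
  intro lista _
  unfold Spec_dividir_en_archivos dividir_en_archivos dividir_en_archivos_alt
  obtain ⟨h1, h2⟩ := loop_split
    (fun i => PySem.List.sorted (PySem.List.slice lista (some i) (some (i + 2))) (fun x => x) false)
    ((lista.length : Int) - 0).toNat 0 (lista.length : Int) le_rfl [] []
  simp only at h1 h2 ⊢
  rw [h1, h2]
  norm_num
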